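-- pv_equiv track=rewrite | github.com/SirFaNaTiC/TP_IA_GLOUTON_NATHAN_BARTHELEMY | greedy_tp.py | solution_vectors
-- ===== SOURCE A (Python) =====
-- def solution_vectors(sol, color):
--     sol2=[]
--     tmp=[]
--     for i in range(1,color+1): # On parcourt les couleurs
--         for j in range(len(sol)): # On parcourt les sommets
--             if sol[j]==i:  # Si le sommet est de la couleur i, on l'ajoute à la liste (vecteur)
--                 tmp.append(j+1)
--         sol2.append(tmp) # On ajoute la liste des sommets de la couleur i à la liste de solution (vecteur de vecteurs)
--         tmp=[]
--     return sol2
-- ===== SOURCE B (Python) =====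
-- def solution_vectors(sol, color):
--     buckets = [[] for _ in range(color)]
--     for j, v in enumerate(sol):
--         if 1 <= v <= color:
--             buckets[v - 1].append(j + 1)
--     return buckets
-- ===== Notes on version B (the rewrite author's own statement) =====
-- stated objective: faster
-- what changed: Replaced the per-color rescan of the whole solution list by a single pass that buckets each vertex into a preallocated list indexed by its color.
import Mathlib
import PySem

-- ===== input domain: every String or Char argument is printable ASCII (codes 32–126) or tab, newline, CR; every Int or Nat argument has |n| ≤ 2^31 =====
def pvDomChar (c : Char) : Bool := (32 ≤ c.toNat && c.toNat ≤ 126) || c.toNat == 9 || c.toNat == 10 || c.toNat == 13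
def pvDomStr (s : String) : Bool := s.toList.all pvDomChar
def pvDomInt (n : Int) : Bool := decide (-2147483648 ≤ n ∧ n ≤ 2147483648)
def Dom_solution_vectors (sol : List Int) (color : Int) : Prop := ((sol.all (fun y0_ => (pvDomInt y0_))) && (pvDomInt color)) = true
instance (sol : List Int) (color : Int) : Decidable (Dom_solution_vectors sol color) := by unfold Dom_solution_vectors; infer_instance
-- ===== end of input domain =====

-- B replaces A's per-color rescans of sol by one pass that buckets each vertex into a
-- preallocated list indexed by its color (objective: faster, O(color*n) → O(color+n)).

-- ===== PORT A =====
-- A: for i in 1..color, scan all indices j of sol, collect j+1 where sol[j]==i, append the list.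
-- (sol[j] is ported with pyGetD; j always lies in range(len(sol)), so no IndexError is reachable.)
def solution_vectors (sol : List Int) (color : Int) : List (List Int) :=
  (PySem.List.pyRange 1 (color + 1) 1).foldl
    (fun (sol2 : List (List Int)) i =>
      sol2 ++ [(PySem.List.pyRange 0 (PySem.List.len sol) 1).foldl
        (fun (tmp : List Int) j =>
          if PySem.List.pyGetD sol j 0 = i then tmp ++ [j + 1] else tmp) []])
    []

-- ===== PORT B =====
-- B: preallocate `color` empty buckets, one pass over enumerate(sol) appending j+1 to bucket v-1.
def solution_vectors_alt (sol : List Int) (color : Int) : List (List Int) :=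
  (PySem.List.enumerate sol).foldl
    (fun (buckets : List (List Int)) p =>
      if 1 ≤ p.2 ∧ p.2 ≤ color then
        buckets.modify (p.2 - 1).toNat (fun l => l ++ [p.1 + 1])
      else buckets)
    ((List.range color.toNat).map (fun _ => ([] : List Int)))

-- ===== PRECONDITION & SPEC =====
def Spec_solution_vectors (sol : List Int) (color : Int) (out : List (List Int)) : Prop := out = solution_vectors_alt sol color
instance (sol : List Int) (color : Int) (out : List (List Int)) : Decidable (Spec_solution_vectors sol color out) := by unfold Spec_solution_vectors; infer_instance

-- ===== CLAIM (what is proved, stated in full; the proofs are below) =====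
def Claim_equal_solution_vectors : Prop := ∀ (sol : List Int) (color : Int), Dom_solution_vectors sol color → Spec_solution_vectors sol color (solution_vectors sol color)

-- ===== LEMMAS AND PROOFS =====

-- the common normal form: bucket k (0-based) holds j+1 for each (j, v) in enumerate(sol) with v = k+1
def pvCollect (l : List (Int × Int)) (k : Nat) : List Int :=
  (l.filter (fun p => decide (p.2 = (k : Int) + 1))).map (fun p => p.1 + 1)

theorem pvCollect_nil (k : Nat) : pvCollect [] k = [] := rfl

theorem range_map_getD {α : Type} (bs : List α) (d : α) :
    (List.range bs.length).map (fun k => bs.getD k d) = bs := by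
  apply List.ext_getElem
  · simp
  · intro i h1 h2
    simp only [List.getElem_map, List.getElem_range]
    rw [List.getD_eq_getElem?_getD, List.getElem?_eq_getElem h2, Option.getD_some]

theorem pvCollect_cons (p : Int × Int) (l : List (Int × Int)) (k : Nat) :
    pvCollect (p :: l) k =
      (if p.2 = (k : Int) + 1 then [p.1 + 1] else []) ++ pvCollect l k := by
  by_cases h : p.2 = (k : Int) + 1 <;> simp [pvCollect, h]

-- A equals the normal form
theorem solution_vectors_eq_collect (sol : List Int) (color : Int) :
    solution_vectors sol color =
      (List.range color.toNat).map (fun k => pvCollect (PySem.List.enumerate sol) k) := by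
  unfold solution_vectors
  rw [PySem.List.foldl_append_singleton_eq_map, List.nil_append,
    PySem.List.pyRange_one 1 (color + 1)]
  have hn : (color + 1 - 1).toNat = color.toNat := by omega
  rw [hn, List.map_map]
  apply List.map_congr_left
  intro k _
  simp only [Function.comp]
  rw [PySem.List.foldl_append_ite (fun j => PySem.List.pyGetD sol j 0 = 1 + (k : Int))
      (fun j => j + 1), List.nil_append]
  rw [pvCollect, PySem.List.enumerate_eq_map_pyRange sol 0, List.filter_map, List.map_map]
  apply congrArg
  apply List.filter_congr
  intro j _
  simp only [Function.comp]
  by_cases h : PySem.List.pyGetD sol j 0 = 1 + (k : Int)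
  · simp [h]; omega
  · simp [h]; omega

-- B's fold, elementwise
theorem foldB_eq (color : Int) (l : List (Int × Int)) :
    ∀ bs : List (List Int), bs.length = color.toNat →
      l.foldl
        (fun (buckets : List (List Int)) p =>
          if 1 ≤ p.2 ∧ p.2 ≤ color then
            buckets.modify (p.2 - 1).toNat (fun t => t ++ [p.1 + 1])
          else buckets) bs
      = (List.range bs.length).map (fun k => bs.getD k [] ++ pvCollect l k) := by
  induction l with
  | nil =>
    intro bs _
    simp only [List.foldl_nil, pvCollect_nil, List.append_nil]
    exact (range_map_getD bs []).symm
  | cons p l ih =>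
    intro bs h
    rw [List.foldl_cons]
    by_cases hc : 1 ≤ p.2 ∧ p.2 ≤ color
    · rw [if_pos hc]
      have hlen : (bs.modify (p.2 - 1).toNat (fun t => t ++ [p.1 + 1])).length = color.toNat := by
        rw [List.length_modify]; exact h
      rw [ih _ hlen, List.length_modify]
      apply List.map_congr_left
      intro k hk
      rw [List.mem_range] at hk
      rw [pvCollect_cons]
      have hsome : bs[k]? = some bs[k] := List.getElem?_eq_getElem hk
      have hget : (bs.modify (p.2 - 1).toNat (fun t => t ++ [p.1 + 1])).getD k [] =
          if (p.2 - 1).toNat = k then bs.getD k [] ++ [p.1 + 1] else bs.getD k [] := by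
        rw [List.getD_eq_getElem?_getD, List.getElem?_modify, hsome]
        by_cases hik : (p.2 - 1).toNat = k <;>
          simp [hik, List.getD_eq_getElem?_getD, hsome]
      rw [hget]
      by_cases hik : (p.2 - 1).toNat = k
      · have hp2 : p.2 = (k : Int) + 1 := by omega
        rw [if_pos hik, if_pos hp2, List.append_assoc]
      · have hp2 : ¬ p.2 = (k : Int) + 1 := by omega
        rw [if_neg hik, if_neg hp2, List.nil_append]
    · rw [if_neg hc]
      rw [ih bs h]
      apply List.map_congr_left
      intro k hk
      rw [List.mem_range, h] at hk
      rw [pvCollect_cons]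
      have hp2 : ¬ p.2 = (k : Int) + 1 := by
        intro he
        exact hc ⟨by omega, by omega⟩
      rw [if_neg hp2, List.nil_append]

-- B equals the normal form
theorem solution_vectors_alt_eq_collect (sol : List Int) (color : Int) :
    solution_vectors_alt sol color =
      (List.range color.toNat).map (fun k => pvCollect (PySem.List.enumerate sol) k) := by
  unfold solution_vectors_alt
  rw [foldB_eq color (PySem.List.enumerate sol) _ (by simp)]
  rw [List.length_map, List.length_range]
  apply List.map_congr_left
  intro k hk
  have hz : ((List.range color.toNat).map (fun _ => ([] : List Int))).getD k [] = [] := by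
    rw [List.getD_eq_getElem?_getD]
    by_cases h : k < color.toNat <;> simp [h]
  rw [hz, List.nil_append]

-- ===== VERDICT (by name: the statement is the Claim_ definition above) =====
theorem solution_vectors_spec : Claim_equal_solution_vectors := by
  intro sol color _
  unfold Spec_solution_vectors
  rw [solution_vectors_eq_collect, solution_vectors_alt_eq_collect]
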